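-- pv_equiv track=rewrite | github.com/Lemonterminator/Mie_Postprocessing_Py | OSCC_postprocessing/binary_ops/functions_bw.py | _generate_neighbor_offsets
-- ===== SOURCE A (Python) =====
-- def _generate_neighbor_offsets(nd, connectivity):
--     """Generate neighbor offsets for given ndim and connectivity.
--     Includes all offsets in {-1,0,1}^nd \\ {0} with L1 distance <= connectivity.
--     """
--     from itertools import product
--     offsets = []
--     for off in product((-1, 0, 1), repeat=nd):
--         if all(o == 0 for o in off):
--             continue
--         if sum(abs(int(o)) for o in off) <= int(connectivity):
--             offsets.append(tuple(int(o) for o in off))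
--     return offsets
-- ===== SOURCE B (Python) =====
-- def _generate_neighbor_offsets(nd, connectivity):
--     """Generate neighbor offsets for given ndim and connectivity.
--     Includes all offsets in {-1,0,1}^nd \\ {0} with L1 distance <= connectivity.
--     """
--     c = int(connectivity)
--     out = []
--
--     def build(rem, acc, s):
--         if s > c:       # prune: L1 distance already exceeds connectivity
--             return
--         if rem == 0:
--             if any(acc):        # skip the all-zero offset
--                 out.append(tuple(acc))
--             return
--         for o in (-1, 0, 1):    # fixed order keeps lexicographic output order
--             build(rem - 1, acc + [o], s + abs(o))
--
--     build(nd, [], 0)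
--     return out
-- ===== Notes on version B (the rewrite author's own statement) =====
-- stated objective: alternative
-- what changed: Replaces the flat itertools.product-then-filter loop with a dimension-by-dimension recursive enumeration that prunes a whole branch as soon as the partial L1 distance exceeds the connectivity, emitting offsets in the same lexicographic order.
import Mathlib
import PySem

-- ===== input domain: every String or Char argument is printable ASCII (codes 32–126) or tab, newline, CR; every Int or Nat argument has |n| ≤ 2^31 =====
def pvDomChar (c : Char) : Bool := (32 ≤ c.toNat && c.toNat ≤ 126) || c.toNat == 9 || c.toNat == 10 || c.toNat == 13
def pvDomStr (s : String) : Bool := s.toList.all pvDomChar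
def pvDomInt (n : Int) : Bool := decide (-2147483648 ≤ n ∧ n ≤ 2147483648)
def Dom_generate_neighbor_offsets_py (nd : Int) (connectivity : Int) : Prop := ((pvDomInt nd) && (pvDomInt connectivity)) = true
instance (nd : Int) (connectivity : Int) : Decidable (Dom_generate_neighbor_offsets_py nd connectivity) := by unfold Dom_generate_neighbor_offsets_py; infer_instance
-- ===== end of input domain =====

-- B replaces A's flat product-and-filter loop with a recursive per-dimension enumeration
-- that prunes branches once the partial L1 distance exceeds the connectivity (objective: alternative).

-- ===== PORT A =====
-- itertools.product((-1,0,1), repeat=n): first coordinate varies slowest (lexicographic order)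
def pvProduct3 : Nat → List (List Int)
  | 0 => [[]]
  | n + 1 => ([-1, 0, 1] : List Int).flatMap (fun a => (pvProduct3 n).map (fun rest => a :: rest))

def generate_neighbor_offsets_py (nd : Int) (connectivity : Int) : List (List Int) :=
  (pvProduct3 nd.toNat).foldl
    (fun offsets off =>
      if off.all (fun o => o == 0) then offsets
      else if ((off.map (fun o => |o|)).sum ≤ connectivity) then offsets ++ [off]
      else offsets)
    []

-- ===== PORT B =====
def pvBuild (c : Int) : Nat → List Int → Int → List (List Int)
  | rem, acc, s =>
    if c < s then []        -- prune: s > c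
    else match rem with
      | 0 => if acc.any (fun o => o != 0) then [acc] else []
      | n + 1 => ([-1, 0, 1] : List Int).flatMap (fun o => pvBuild c n (acc ++ [o]) (s + |o|))

def generate_neighbor_offsets_py_alt (nd : Int) (connectivity : Int) : List (List Int) :=
  pvBuild connectivity nd.toNat [] 0

-- ===== PRECONDITION & SPEC =====
-- Pre_ excludes nd < 0, where Python A raises ValueError (itertools.product rejects a negative repeat).
def Pre_generate_neighbor_offsets_py (nd : Int) (connectivity : Int) : Prop := 0 ≤ nd
instance (nd : Int) (connectivity : Int) : Decidable (Pre_generate_neighbor_offsets_py nd connectivity) := by unfold Pre_generate_neighbor_offsets_py; infer_instance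
def pvWitness_generate_neighbor_offsets_py : Int × Int := (2, 1)

def Spec_generate_neighbor_offsets_py (nd : Int) (connectivity : Int) (out : List (List Int)) : Prop := out = generate_neighbor_offsets_py_alt nd connectivity
instance (nd : Int) (connectivity : Int) (out : List (List Int)) : Decidable (Spec_generate_neighbor_offsets_py nd connectivity out) := by unfold Spec_generate_neighbor_offsets_py; infer_instance

-- ===== CLAIM (what is proved, stated in full; the proofs are below) =====
def Claim_equal_generate_neighbor_offsets_py : Prop := ∀ (nd : Int) (connectivity : Int), Dom_generate_neighbor_offsets_py nd connectivity → Pre_generate_neighbor_offsets_py nd connectivity → Spec_generate_neighbor_offsets_py nd connectivity (generate_neighbor_offsets_py nd connectivity)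

-- ===== LEMMAS AND PROOFS =====

def pvSumAbs (l : List Int) : Int := (l.map (fun o => |o|)).sum

lemma pvSumAbs_nonneg (l : List Int) : 0 ≤ pvSumAbs l := by
  induction l with
  | nil => simp [pvSumAbs]
  | cons a t ih =>
      simp only [pvSumAbs, List.map_cons, List.sum_cons] at *
      have := abs_nonneg a
      omega

lemma any_ne_eq_not_all (l : List Int) :
    (l.any (fun o => o != 0)) = !(l.all (fun o => o == 0)) := by
  induction l with
  | nil => simp
  | cons a t ih =>
      simp only [bne] at ih ⊢
      simp [List.any_cons, List.all_cons, ih, Bool.not_and]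

-- the filter predicate both sides compute
def pvKeep (c : Int) (acc : List Int) (s : Int) (rest : List Int) : Bool :=
  (!((acc ++ rest).all (fun o => o == 0))) && decide (s + pvSumAbs rest ≤ c)

lemma pvKeep_cons (c : Int) (acc : List Int) (s : Int) (o : Int) (rest : List Int) :
    pvKeep c acc s (o :: rest) = pvKeep c (acc ++ [o]) (s + |o|) rest := by
  simp only [pvKeep, pvSumAbs, List.append_assoc, List.singleton_append, List.map_cons,
    List.sum_cons, ← add_assoc]
  rfl

lemma pvBuild_eq_filter (c : Int) (n : Nat) :
    ∀ (acc : List Int) (s : Int),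
      pvBuild c n acc s
        = ((pvProduct3 n).filter (pvKeep c acc s)).map (fun rest => acc ++ rest) := by
  induction n with
  | zero =>
      intro acc s
      unfold pvBuild
      by_cases h : c < s
      · have hf : pvKeep c acc s [] = false := by
          simp only [pvKeep, pvSumAbs, List.map_nil, List.sum_nil, add_zero]
          simp
          omega
        simp [h, pvProduct3, hf]
      · have hk : pvKeep c acc s [] = !acc.all (fun o => o == 0) := by
          simp only [pvKeep, pvSumAbs, List.map_nil, List.sum_nil, add_zero, List.append_nil]
          have : decide (s ≤ c) = true := by simp; omega
          rw [this, Bool.and_true]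
        rw [if_neg h]
        simp only [pvProduct3, List.filter_cons, hk, List.filter_nil]
        rw [any_ne_eq_not_all]
        cases hall : acc.all (fun o => o == 0)
        · simp
        · simp [hall]
  | succ m ih =>
      intro acc s
      unfold pvBuild
      by_cases h : c < s
      · have hf : ∀ rest ∈ pvProduct3 (m + 1), pvKeep c acc s rest = false := by
          intro rest _
          have := pvSumAbs_nonneg rest
          simp only [pvKeep, Bool.and_eq_false_iff, decide_eq_false_iff_not]
          right; omega
        rw [List.filter_eq_nil_iff.mpr (by intro a ha; simp [hf a ha])]
        simp [h]
      · rw [if_neg h]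
        show (([-1,0,1] : List Int).flatMap (fun o => pvBuild c m (acc ++ [o]) (s + |o|))) = _
        simp only [pvProduct3, List.filter_flatMap, List.map_flatMap]
        refine List.flatMap_congr (fun o _ => ?_)
        rw [ih (acc ++ [o]) (s + |o|)]
        rw [List.filter_map, List.map_map]
        have hp : (pvKeep c acc s ∘ fun rest => o :: rest) = pvKeep c (acc ++ [o]) (s + |o|) := by
          funext rest; simp [Function.comp, pvKeep_cons]
        rw [hp]
        congr 1
        funext rest
        simp

lemma foldl_filter (c : Int) :
    ∀ (l init : List (List Int)),
      l.foldl
        (fun offsets off =>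
          if off.all (fun o => o == 0) then offsets
          else if ((off.map (fun o => |o|)).sum ≤ c) then offsets ++ [off]
          else offsets)
        init
      = init ++ l.filter (pvKeep c [] 0) := by
  intro l
  induction l with
  | nil => intro init; simp
  | cons a t ih =>
      intro init
      rw [List.foldl_cons]
      have hk : pvKeep c [] 0 a
          = ((!(a.all (fun o => o == 0))) && decide ((a.map (fun o => |o|)).sum ≤ c)) := by
        simp only [pvKeep, List.nil_append, pvSumAbs, zero_add]
      cases hall : a.all (fun o => o == 0) with
      | true =>
          rw [if_pos rfl, ih, List.filter_cons]
          have hf : pvKeep c [] 0 a = false := by rw [hk]; simp [hall]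
          simp [hf]
      | false =>
          rw [if_neg (by simp)]
          by_cases hs : ((a.map (fun o => |o|)).sum ≤ c)
          · rw [if_pos hs, ih, List.filter_cons]
            have ht : pvKeep c [] 0 a = true := by rw [hk]; simp [hall, hs]
            simp [ht]
          · rw [if_neg hs, ih, List.filter_cons]
            have hf : pvKeep c [] 0 a = false := by rw [hk]; simp [hall, hs]
            simp [hf]

-- ===== VERDICT (by name: the statement is the Claim_ definition above) =====
theorem generate_neighbor_offsets_py_spec : Claim_equal_generate_neighbor_offsets_py := by
  intro nd c _ _
  unfold Spec_generate_neighbor_offsets_py generate_neighbor_offsets_py generate_neighbor_offsets_py_alt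
  rw [foldl_filter, pvBuild_eq_filter]
  simp
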